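-- pv_equiv track=rewrite | github.com/yding25/TMPUD | task-level/facts_from_townmap.py | sort_waypoints
-- ===== SOURCE A (Python) =====
-- def sort_waypoints(all_waypoints_list, road_id_list, lane_id_list):
--     # -----------------------------------------
--     # sort all_waypoints: road_id (from min to max), lane_id(from min to max)
--     # -----------------------------------------
--     all_waypoints_list_sorted = []
--     road_id_min = min(road_id_list)
--     road_id_max = max(road_id_list)
--     lane_id_min = min(lane_id_list)
--     lane_id_max = max(lane_id_list)
--     id_in_taskplanner = 1
--     for road_id in range(road_id_min, road_id_max + 1):
--         for lane_id in range(lane_id_min, lane_id_max + 1):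
--             signal_found = 0
--             for element in all_waypoints_list:
--                 if element[0] == road_id and element[1] == lane_id:
--                     signal_found = 1
--                     element.append(id_in_taskplanner)
--                     all_waypoints_list_sorted.append(element)
--             if signal_found == 1:
--                 id_in_taskplanner = id_in_taskplanner + 1
--     return all_waypoints_list_sorted
-- ===== SOURCE B (Python) =====
-- def sort_waypoints(all_waypoints_list, road_id_list, lane_id_list):
--     # Same return value (and same in-place element mutation) as the original,
--     # but instead of scanning every (road,lane) cell of the dense id grid it
--     # collects the distinct keys actually present, sorts them, and emits groups.
--     road_min, road_max = min(road_id_list), max(road_id_list)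
--     lane_min, lane_max = min(lane_id_list), max(lane_id_list)
--     keys = sorted({(e[0], e[1]) for e in all_waypoints_list
--                    if road_min <= e[0] <= road_max and lane_min <= e[1] <= lane_max})
--     result = []
--     for new_id, key in enumerate(keys, 1):
--         for e in all_waypoints_list:
--             if e[0] == key[0] and e[1] == key[1]:
--                 e.append(new_id)
--                 result.append(e)
--     return result
-- ===== Notes on version B (the rewrite author's own statement) =====
-- stated objective: faster
-- what changed: Instead of scanning the whole waypoint list once per cell of the dense road-range x lane-range grid, B collects the distinct (road_id, lane_id) keys actually present, sorts them, and emits one group per key, so the cost no longer depends on the id ranges.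
import Mathlib
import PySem

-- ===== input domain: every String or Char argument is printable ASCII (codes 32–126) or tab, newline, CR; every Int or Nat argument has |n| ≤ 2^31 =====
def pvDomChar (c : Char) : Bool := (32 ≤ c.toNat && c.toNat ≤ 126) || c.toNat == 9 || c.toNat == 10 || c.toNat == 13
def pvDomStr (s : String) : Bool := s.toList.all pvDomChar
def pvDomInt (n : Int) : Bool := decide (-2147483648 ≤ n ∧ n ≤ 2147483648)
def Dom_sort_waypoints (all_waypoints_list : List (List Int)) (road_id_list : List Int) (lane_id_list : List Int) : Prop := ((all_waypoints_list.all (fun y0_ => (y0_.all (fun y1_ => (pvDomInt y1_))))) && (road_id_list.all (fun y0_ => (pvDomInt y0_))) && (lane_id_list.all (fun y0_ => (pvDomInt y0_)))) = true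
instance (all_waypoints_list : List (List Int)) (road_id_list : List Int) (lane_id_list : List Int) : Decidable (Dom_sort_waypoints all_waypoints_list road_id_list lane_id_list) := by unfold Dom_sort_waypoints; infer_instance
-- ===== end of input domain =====

-- B replaces A's scan of the waypoint list once per cell of the dense road×lane id grid by
-- sorting the distinct (road,lane) keys actually present and emitting one group per key.
-- Both Pythons mutate the waypoint elements in place identically; the theorems are about the return value.


-- ===== PORT A =====
def sort_waypoints (all_waypoints_list : List (List Int)) (road_id_list : List Int) (lane_id_list : List Int) : List (List Int) :=
  let road_id_min := (PySem.List.min? road_id_list (fun x => x)).getD 0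
  let road_id_max := (PySem.List.max? road_id_list (fun x => x)).getD 0
  let lane_id_min := (PySem.List.min? lane_id_list (fun x => x)).getD 0
  let lane_id_max := (PySem.List.max? lane_id_list (fun x => x)).getD 0
  ((PySem.List.pyRange road_id_min (road_id_max + 1) 1).foldl (fun st road_id =>
    (PySem.List.pyRange lane_id_min (lane_id_max + 1) 1).foldl (fun st lane_id =>
      let p := all_waypoints_list.foldl (fun (q : Bool × List (List Int)) element =>
        if PySem.List.pyGetD element 0 0 = road_id ∧ PySem.List.pyGetD element 1 0 = lane_id
        then (true, q.2 ++ [element ++ [st.2]]) else q) (false, st.1)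
      if p.1 then (p.2, st.2 + 1) else (p.2, st.2)) st)
    (([] : List (List Int)), (1 : Int))).1

-- ===== PORT B =====
def sort_waypoints_alt (all_waypoints_list : List (List Int)) (road_id_list : List Int) (lane_id_list : List Int) : List (List Int) :=
  let road_min := (PySem.List.min? road_id_list (fun x => x)).getD 0
  let road_max := (PySem.List.max? road_id_list (fun x => x)).getD 0
  let lane_min := (PySem.List.min? lane_id_list (fun x => x)).getD 0
  let lane_max := (PySem.List.max? lane_id_list (fun x => x)).getD 0
  let keys : List (Int × Int) := PySem.List.sorted2
    (PySem.Set.ofList ((all_waypoints_list.filter (fun e =>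
        decide (road_min ≤ PySem.List.pyGetD e 0 0 ∧ PySem.List.pyGetD e 0 0 ≤ road_max ∧
                lane_min ≤ PySem.List.pyGetD e 1 0 ∧ PySem.List.pyGetD e 1 0 ≤ lane_max))).map
      (fun e => (PySem.List.pyGetD e 0 0, PySem.List.pyGetD e 1 0))))
    (fun k => k.1) (fun k => k.2)
  (PySem.List.enumerate keys 1).foldl (fun result ik =>
    all_waypoints_list.foldl (fun result e =>
      if PySem.List.pyGetD e 0 0 = ik.2.1 ∧ PySem.List.pyGetD e 1 0 = ik.2.2
      then result ++ [e ++ [ik.1]] else result) result) []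

-- ===== PRECONDITION & SPEC =====
-- Pre_ excludes exactly the inputs on which the Python A raises: an empty road/lane id list
-- (min/max → ValueError) and a waypoint that is empty, or of length 1 while its road id lies
-- inside the road-id range (element[0] / element[1] → IndexError).
def Pre_sort_waypoints (all_waypoints_list : List (List Int)) (road_id_list : List Int) (lane_id_list : List Int) : Prop :=
  road_id_list ≠ [] ∧ lane_id_list ≠ [] ∧
  ∀ e ∈ all_waypoints_list, e ≠ [] ∧
    (((∃ a ∈ road_id_list, a ≤ PySem.List.pyGetD e 0 0) ∧
      (∃ b ∈ road_id_list, PySem.List.pyGetD e 0 0 ≤ b)) → 2 ≤ e.length)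
instance (all_waypoints_list : List (List Int)) (road_id_list : List Int) (lane_id_list : List Int) : Decidable (Pre_sort_waypoints all_waypoints_list road_id_list lane_id_list) := by unfold Pre_sort_waypoints; infer_instance

def pvWitness_sort_waypoints : List (List Int) × List Int × List Int :=
  ([[1, 2], [0, 5], [1, 2, 7], [9, 9]], [0, 1], [2, 5])

def Spec_sort_waypoints (all_waypoints_list : List (List Int)) (road_id_list : List Int) (lane_id_list : List Int) (out : List (List Int)) : Prop := out = sort_waypoints_alt all_waypoints_list road_id_list lane_id_list
instance (all_waypoints_list : List (List Int)) (road_id_list : List Int) (lane_id_list : List Int) (out : List (List Int)) : Decidable (Spec_sort_waypoints all_waypoints_list road_id_list lane_id_list out) := by unfold Spec_sort_waypoints; infer_instance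

-- ===== CLAIM (what is proved, stated in full; the proofs are below) =====
def Claim_equal_sort_waypoints : Prop := ∀ (all_waypoints_list : List (List Int)) (road_id_list : List Int) (lane_id_list : List Int), Dom_sort_waypoints all_waypoints_list road_id_list lane_id_list → Pre_sort_waypoints all_waypoints_list road_id_list lane_id_list → Spec_sort_waypoints all_waypoints_list road_id_list lane_id_list (sort_waypoints all_waypoints_list road_id_list lane_id_list)

-- ===== LEMMAS AND PROOFS =====

-- lex-lt on Int pairs, and sorted2's "before"
def lexlt (a b : Int × Int) : Prop := a.1 < b.1 ∨ (a.1 = b.1 ∧ a.2 < b.2)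
def lexBefore (a b : Int × Int) : Bool := decide (a.1 < b.1) || (!decide (b.1 < a.1) && decide (a.2 < b.2))
def lexle (a b : Int × Int) : Prop := lexBefore b a = false

theorem sorted2_eq_foldl (xs : List (Int × Int)) :
    PySem.List.sorted2 xs (fun k => k.1) (fun k => k.2) =
      xs.foldl (fun acc x => PySem.List.insertBy lexBefore x acc) [] := by
  unfold PySem.List.sorted2 lexBefore
  rfl

theorem insertBy_pairwise (x : Int × Int) (l : List (Int × Int)) (h : l.Pairwise lexle) :
    (PySem.List.insertBy lexBefore x l).Pairwise lexle := by
  induction l with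
  | nil => simp [PySem.List.insertBy]
  | cons y ys ih =>
    rw [List.pairwise_cons] at h
    by_cases hb : lexBefore x y = true
    · show (if lexBefore x y = true then x :: y :: ys else _).Pairwise lexle
      rw [if_pos hb]
      refine List.Pairwise.cons ?_ (List.Pairwise.cons h.1 h.2)
      intro z hz
      rcases List.mem_cons.1 hz with hz | hz
      · subst hz
        simp only [lexBefore, lexle] at hb ⊢
        simp at hb ⊢
        omega
      · have hyz := h.1 z hz
        simp only [lexBefore, lexle] at hb hyz ⊢
        simp at hb hyz ⊢
        omega
    · show (if lexBefore x y = true then x :: y :: ys else y :: PySem.List.insertBy lexBefore x ys).Pairwise lexle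
      rw [if_neg hb]
      refine List.Pairwise.cons ?_ (ih h.2)
      intro z hz
      rw [PySem.List.mem_insertBy] at hz
      rcases hz with hz | hz
      · subst hz
        simp only [lexBefore, lexle] at hb ⊢
        simp at hb ⊢
        omega
      · exact h.1 z hz

theorem foldl_insertBy_pairwise (xs : List (Int × Int)) (acc : List (Int × Int))
    (h : acc.Pairwise lexle) :
    (xs.foldl (fun acc x => PySem.List.insertBy lexBefore x acc) acc).Pairwise lexle := by
  induction xs generalizing acc with
  | nil => exact h
  | cons x xs ih => exact ih _ (insertBy_pairwise x acc h)

theorem lexle_antisymm (a b : Int × Int) (h1 : lexle a b) (h2 : lexle b a) : a = b := by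
  simp only [lexle, lexBefore] at h1 h2
  simp at h1 h2
  have : a.1 = b.1 ∧ a.2 = b.2 := by omega
  exact Prod.ext this.1 this.2

theorem lexlt_le (a b : Int × Int) (h : lexlt a b) : lexle a b := by
  simp only [lexlt] at h
  simp only [lexle, lexBefore]
  simp
  omega

-- uniqueness of the sorted order
theorem sorted_unique (l1 l2 : List (Int × Int)) (hp : l1.Perm l2)
    (h1 : l1.Pairwise lexle) (h2 : l2.Pairwise lexle) : l1 = l2 :=
  List.Perm.eq_of_pairwise (fun a b _ _ => lexle_antisymm a b) h1 h2 hp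

-- L1: A's inner scan over the waypoints
theorem innerA (wps : List (List Int)) (road lane idv : Int) (b : Bool) (acc : List (List Int)) :
    wps.foldl (fun (q : Bool × List (List Int)) e =>
        if PySem.List.pyGetD e 0 0 = road ∧ PySem.List.pyGetD e 1 0 = lane
        then (true, q.2 ++ [e ++ [idv]]) else q) (b, acc)
    = (b || wps.any (fun e => decide (PySem.List.pyGetD e 0 0 = road ∧ PySem.List.pyGetD e 1 0 = lane)),
       acc ++ (wps.filter (fun e => decide (PySem.List.pyGetD e 0 0 = road ∧ PySem.List.pyGetD e 1 0 = lane))).map (fun e => e ++ [idv])) := by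
  induction wps generalizing b acc with
  | nil => simp
  | cons e es ih =>
    simp only [List.foldl_cons, List.any_cons, List.filter_cons]
    by_cases h : PySem.List.pyGetD e 0 0 = road ∧ PySem.List.pyGetD e 1 0 = lane
    · rw [if_pos h, ih]
      simp [h]
    · rw [if_neg h, ih]
      simp [h]

-- L2: two nested counting loops are one loop over the grid of pairs
theorem nestedFold {γ δ σ : Type} (l1 : List γ) (l2 : List δ) (h : σ → γ → δ → σ) (init : σ) :
    l1.foldl (fun s a => l2.foldl (fun s b => h s a b) s) init
      = (l1.flatMap (fun a => l2.map (fun b => (a, b)))).foldl (fun s p => h s p.1 p.2) init := by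
  induction l1 generalizing init with
  | nil => simp
  | cons a l1 ih =>
    simp only [List.foldl_cons, List.flatMap_cons, List.foldl_append, ih, List.foldl_map]

-- L3: a fold that appends a group and bumps the counter is a flatMap over enumerate
theorem counterFold (K : List (Int × Int)) (g : Int × Int → Int → List (List Int))
    (acc : List (List Int)) (n : Int) :
    (K.foldl (fun (st : List (List Int) × Int) k => (st.1 ++ g k st.2, st.2 + 1)) (acc, n)).1
      = acc ++ (PySem.List.enumerate K n).flatMap (fun ik => g ik.2 ik.1) := by
  induction K generalizing acc n with
  | nil => simp [PySem.List.enumerate]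
  | cons k K ih =>
    simp only [List.foldl_cons, PySem.List.enumerate_cons, List.flatMap_cons, ih]
    simp [List.append_assoc]

-- the dense grid of (road, lane) cells A iterates over
def grid (rmin rmax lmin lmax : Int) : List (Int × Int) :=
  (PySem.List.pyRange rmin (rmax + 1) 1).flatMap
    (fun a => (PySem.List.pyRange lmin (lmax + 1) 1).map (fun b => (a, b)))

theorem mem_grid (rmin rmax lmin lmax : Int) (k : Int × Int) :
    k ∈ grid rmin rmax lmin lmax ↔
      (rmin ≤ k.1 ∧ k.1 ≤ rmax ∧ lmin ≤ k.2 ∧ k.2 ≤ lmax) := by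
  rcases k with ⟨r, l⟩
  constructor
  · intro h
    rcases List.mem_flatMap.1 h with ⟨a, ha, hm⟩
    rcases List.mem_map.1 hm with ⟨b, hb, he⟩
    rw [PySem.List.mem_pyRange_one] at ha hb
    injection he with h1 h2
    subst h1; subst h2
    exact ⟨by omega, by omega, by omega, by omega⟩
  · intro h
    refine List.mem_flatMap.2 ⟨r, PySem.List.mem_pyRange_one.2 ⟨by omega, by omega⟩, ?_⟩
    exact List.mem_map.2 ⟨l, PySem.List.mem_pyRange_one.2 ⟨by omega, by omega⟩, rfl⟩

theorem grid_pairwise (rmin rmax lmin lmax : Int) :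
    (grid rmin rmax lmin lmax).Pairwise lexlt := by
  unfold grid
  have hr := PySem.List.pairwise_lt_pyRange_one rmin (rmax + 1)
  have hl := PySem.List.pairwise_lt_pyRange_one lmin (lmax + 1)
  generalize PySem.List.pyRange rmin (rmax + 1) 1 = roads at hr
  generalize PySem.List.pyRange lmin (lmax + 1) 1 = lanes at hl
  induction roads with
  | nil => simp
  | cons a roads ih =>
    rw [List.pairwise_cons] at hr
    simp only [List.flatMap_cons]
    rw [List.pairwise_append]
    refine ⟨?_, ih hr.2, ?_⟩
    · exact List.pairwise_map.2 (hl.imp (fun h => Or.inr ⟨rfl, h⟩))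
    · intro x hx y hy
      rcases List.mem_map.1 hx with ⟨b, _, rfl⟩
      rcases List.mem_flatMap.1 hy with ⟨a', ha', hy'⟩
      rcases List.mem_map.1 hy' with ⟨b', _, rfl⟩
      exact Or.inl (hr.1 a' ha')

theorem lexlt_irrefl (a : Int × Int) : ¬ lexlt a a := by
  simp [lexlt]

theorem grid_nodup (rmin rmax lmin lmax : Int) : (grid rmin rmax lmin lmax).Nodup :=
  (grid_pairwise rmin rmax lmin lmax).imp (fun {a b} h => by
    intro hab; subst hab; exact lexlt_irrefl a h)

theorem keys_eq (wps : List (List Int)) (rmin rmax lmin lmax : Int) :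
    (grid rmin rmax lmin lmax).filter (fun k =>
        wps.any (fun e => decide (PySem.List.pyGetD e 0 0 = k.1 ∧ PySem.List.pyGetD e 1 0 = k.2)))
      = PySem.List.sorted2
          (PySem.Set.ofList ((wps.filter (fun e =>
              decide (rmin ≤ PySem.List.pyGetD e 0 0 ∧ PySem.List.pyGetD e 0 0 ≤ rmax ∧
                      lmin ≤ PySem.List.pyGetD e 1 0 ∧ PySem.List.pyGetD e 1 0 ≤ lmax))).map
            (fun e => (PySem.List.pyGetD e 0 0, PySem.List.pyGetD e 1 0))))
          (fun k => k.1) (fun k => k.2) := by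
  apply sorted_unique
  · -- permutation
    refine List.Perm.trans ?_ (PySem.List.sorted2_perm _ _ _ _).symm
    rw [List.perm_ext_iff_of_nodup ((grid_nodup rmin rmax lmin lmax).filter _) (PySem.Set.nodup_ofList _)]
    intro k
    rw [List.mem_filter, PySem.Set.mem_ofList, mem_grid, List.any_eq_true]
    constructor
    · rintro ⟨hb, e, he, hpe⟩
      rw [decide_eq_true_iff] at hpe
      refine List.mem_map.2 ⟨e, List.mem_filter.2 ⟨he, ?_⟩, Prod.ext hpe.1 hpe.2⟩
      rw [decide_eq_true_iff]
      omega
    · intro hk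
      rcases List.mem_map.1 hk with ⟨e, he, hke⟩
      rcases List.mem_filter.1 he with ⟨hew, hce⟩
      rw [decide_eq_true_iff] at hce
      subst hke
      exact ⟨⟨by omega, by omega, by omega, by omega⟩,
        e, hew, by rw [decide_eq_true_iff]; exact ⟨rfl, rfl⟩⟩
  · exact ((grid_pairwise rmin rmax lmin lmax).filter _).imp (fun h => lexlt_le _ _ h)
  · rw [sorted2_eq_foldl]
    exact foldl_insertBy_pairwise _ [] (by simp)

theorem stepA_pointwise (wps : List (List Int)) (st : List (List Int) × Int) (road lane : Int) :
    (if (wps.any (fun e => decide (PySem.List.pyGetD e 0 0 = road ∧ PySem.List.pyGetD e 1 0 = lane)))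
     then ((st.1 ++ (wps.filter (fun e => decide (PySem.List.pyGetD e 0 0 = road ∧ PySem.List.pyGetD e 1 0 = lane))).map (fun e => e ++ [st.2]), st.2 + 1) : List (List Int) × Int)
     else (st.1 ++ (wps.filter (fun e => decide (PySem.List.pyGetD e 0 0 = road ∧ PySem.List.pyGetD e 1 0 = lane))).map (fun e => e ++ [st.2]), st.2))
    = (if (wps.any (fun e => decide (PySem.List.pyGetD e 0 0 = road ∧ PySem.List.pyGetD e 1 0 = lane)))
       then (st.1 ++ (wps.filter (fun e => decide (PySem.List.pyGetD e 0 0 = road ∧ PySem.List.pyGetD e 1 0 = lane))).map (fun e => e ++ [st.2]), st.2 + 1)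
       else st) := by
  by_cases h : (wps.any (fun e => decide (PySem.List.pyGetD e 0 0 = road ∧ PySem.List.pyGetD e 1 0 = lane))) = true
  · rw [if_pos h, if_pos h]
  · rw [if_neg h, if_neg h]
    have : wps.filter (fun e => decide (PySem.List.pyGetD e 0 0 = road ∧ PySem.List.pyGetD e 1 0 = lane)) = [] := by
      rw [List.filter_eq_nil_iff]
      intro e he hc
      exact h (List.any_eq_true.2 ⟨e, he, hc⟩)
    rw [this]
    simp

theorem ports_agree (wps : List (List Int)) (rids lids : List Int) :
    sort_waypoints wps rids lids = sort_waypoints_alt wps rids lids := by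
  unfold sort_waypoints sort_waypoints_alt
  simp only [innerA, Bool.false_or, stepA_pointwise]
  rw [nestedFold _ _ (fun (st : List (List Int) × Int) road lane =>
      if (wps.any (fun e => decide (PySem.List.pyGetD e 0 0 = road ∧ PySem.List.pyGetD e 1 0 = lane)))
      then (st.1 ++ (wps.filter (fun e => decide (PySem.List.pyGetD e 0 0 = road ∧ PySem.List.pyGetD e 1 0 = lane))).map (fun e => e ++ [st.2]), st.2 + 1)
      else st)]
  rw [PySem.List.foldl_if_eq_foldl_filter]
  rw [counterFold _ (fun k i => (wps.filter (fun e => decide (PySem.List.pyGetD e 0 0 = k.1 ∧ PySem.List.pyGetD e 1 0 = k.2))).map (fun e => e ++ [i]))]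
  rw [show ((PySem.List.pyRange ((PySem.List.min? rids (fun x => x)).getD 0) ((PySem.List.max? rids (fun x => x)).getD 0 + 1) 1).flatMap
        (fun a => (PySem.List.pyRange ((PySem.List.min? lids (fun x => x)).getD 0) ((PySem.List.max? lids (fun x => x)).getD 0 + 1) 1).map (fun b => (a, b))))
      = grid ((PySem.List.min? rids (fun x => x)).getD 0) ((PySem.List.max? rids (fun x => x)).getD 0)
             ((PySem.List.min? lids (fun x => x)).getD 0) ((PySem.List.max? lids (fun x => x)).getD 0) from rfl]
  rw [keys_eq]
  simp only [PySem.List.foldl_append_ite, PySem.List.foldl_append_eq_flatMap]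

-- ===== VERDICT (by name: the statement is the Claim_ definition above) =====
theorem sort_waypoints_spec : Claim_equal_sort_waypoints := by
  intro wps rids lids _ _
  unfold Spec_sort_waypoints
  exact ports_agree wps rids lids
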